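-- pv_equiv track=rewrite | github.com/dcharb78/UFRF-MonsterMoonshinev1 | python/ufrf_monster/concurrency_sim.py | analyze_concurrency
-- ===== SOURCE A (Python) =====
-- from typing import List, Set, Tuple
--
-- def analyze_concurrency(L: int, active_flags: List[bool]) -> Tuple[int, bool]:
--     """
--     Given L and the time series of Active(t),
--     compute:
--       - max_inactive_run
--       - periodicity_approx: whether pattern appears L-periodic in window
--     """
--     max_run = 0
--     current_run = 0
--     for flag in active_flags:
--         if flag:
--             current_run = 0
--         else:
--             current_run += 1
--             if current_run > max_run:
--                 max_run = current_run
--     # Periodicity check over first 2L steps if available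
--     periodic = False
--     if len(active_flags) >= 2 * L:
--         periodic = (active_flags[:L] == active_flags[L:2*L])
--     return max_run, periodic
-- ===== SOURCE B (Python) =====
-- from typing import List, Tuple
--
-- def analyze_concurrency(L: int, active_flags: List[bool]) -> Tuple[int, bool]:
--     n = len(active_flags)
--     # positions of active steps, with sentinels -1 and n; the longest inactive
--     # run is the largest gap between consecutive active positions.
--     bounds = [-1] + [i for i, f in enumerate(active_flags) if f] + [n]
--     max_run = max(b - a - 1 for a, b in zip(bounds, bounds[1:]))
--     periodic = n >= 2 * L and active_flags[:L] == active_flags[L:2*L]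
--     return max_run, periodic
-- ===== Notes on version B (the rewrite author's own statement) =====
-- stated objective: alternative
-- what changed: Instead of scanning the flags with a running current_run/max_run counter, B collects the positions of the active flags, brackets them with sentinels -1 and len(active_flags), and returns the maximum gap between consecutive positions; the periodicity check is the same slice comparison written as one boolean expression.
import Mathlib
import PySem

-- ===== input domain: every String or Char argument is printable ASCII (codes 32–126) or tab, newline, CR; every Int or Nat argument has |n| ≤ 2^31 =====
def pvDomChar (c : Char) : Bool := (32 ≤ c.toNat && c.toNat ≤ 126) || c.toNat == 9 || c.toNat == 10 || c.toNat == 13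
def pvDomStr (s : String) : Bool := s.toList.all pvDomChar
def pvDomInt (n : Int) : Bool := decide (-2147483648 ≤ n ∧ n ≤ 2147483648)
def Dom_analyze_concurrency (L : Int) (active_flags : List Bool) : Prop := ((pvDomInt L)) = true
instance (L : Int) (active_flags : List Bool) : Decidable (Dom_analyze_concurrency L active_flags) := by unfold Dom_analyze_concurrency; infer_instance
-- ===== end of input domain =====

-- B drops A's running max_run/current_run counter entirely: it collects the positions of
-- the active flags, brackets them with sentinels -1 and len, and takes the maximum gap
-- between consecutive positions; same periodicity check. Objective: alternative.

-- ===== PORT A =====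
def analyze_concurrency (L : Int) (active_flags : List Bool) : Int × Bool :=
  -- max_run = 0; current_run = 0; for flag in active_flags: ...
  let mc : Int × Int := active_flags.foldl
    (fun (mc : Int × Int) (flag : Bool) =>
      if flag then (mc.1, 0)
      else
        let c := mc.2 + 1
        (if c > mc.1 then c else mc.1, c))
    (0, 0)
  -- periodic = False; if len(active_flags) >= 2*L: periodic = (active_flags[:L] == active_flags[L:2*L])
  let periodic : Bool :=
    if (active_flags.length : Int) ≥ 2 * L then
      decide (PySem.List.slice active_flags none (some L)
            = PySem.List.slice active_flags (some L) (some (2 * L)))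
    else false
  (mc.1, periodic)

-- ===== PORT B =====
def analyze_concurrency_alt (L : Int) (active_flags : List Bool) : Int × Bool :=
  let n : Int := active_flags.length
  -- bounds = [-1] + [i for i, f in enumerate(active_flags) if f] + [n]
  let bounds : List Int :=
    -1 :: ((PySem.List.enumerate active_flags).filter (·.2)).map (·.1) ++ [n]
  -- max_run = max(b - a - 1 for a, b in zip(bounds, bounds[1:]))
  -- (the genexpr is never empty: bounds has at least the two sentinels, so
  --  Python's max never raises; .getD 0 is unreachable)
  let gaps : List Int := (bounds.zip bounds.tail).map (fun p => p.2 - p.1 - 1)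
  let max_run : Int := (PySem.List.max? gaps (fun y => y)).getD 0
  -- periodic = n >= 2*L and active_flags[:L] == active_flags[L:2*L]
  let periodic : Bool :=
    decide (n ≥ 2 * L)
      && decide (PySem.List.slice active_flags none (some L)
               = PySem.List.slice active_flags (some L) (some (2 * L)))
  (max_run, periodic)

-- ===== PRECONDITION & SPEC =====
def Spec_analyze_concurrency (L : Int) (active_flags : List Bool) (out : Int × Bool) : Prop := out = analyze_concurrency_alt L active_flags
instance (L : Int) (active_flags : List Bool) (out : Int × Bool) : Decidable (Spec_analyze_concurrency L active_flags out) := by unfold Spec_analyze_concurrency; infer_instance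

-- ===== CLAIM (what is proved, stated in full; the proofs are below) =====
def Claim_equal_analyze_concurrency : Prop := ∀ (L : Int) (active_flags : List Bool), Dom_analyze_concurrency L active_flags → Spec_analyze_concurrency L active_flags (analyze_concurrency L active_flags)

-- ===== LEMMAS AND PROOFS =====

-- proof-side model of A's loop: fRun c l = the best inactive run of l, with a pending
-- prefix run of length c (the part of the current inactive run already consumed)
def fRun : Int → List Bool → Int
  | _, [] => 0
  | _, true :: t => fRun 0 t
  | c, false :: t => max (c + 1) (fRun (c + 1) t)

lemma fRun_nonneg (l : List Bool) : ∀ c : Int, 0 ≤ c → 0 ≤ fRun c l := by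
  induction l with
  | nil => intro c _; simp [fRun]
  | cons x t ih =>
    intro c hc
    cases x with
    | true => exact ih 0 le_rfl
    | false => exact le_trans (ih (c + 1) (by omega)) (le_max_right _ _)

-- A's loop computes max m (fRun c l)
lemma loopA_eq (l : List Bool) : ∀ m c : Int, 0 ≤ m →
    (l.foldl (fun (mc : Int × Int) (flag : Bool) =>
      if flag then (mc.1, 0)
      else
        let c := mc.2 + 1
        (if c > mc.1 then c else mc.1, c)) (m, c)).1 = max m (fRun c l) := by
  induction l with
  | nil => intro m c hm; simpa [fRun] using (max_eq_left hm).symm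
  | cons x t ih =>
    intro m c hm
    cases x with
    | true => simpa [fRun] using ih m 0 hm
    | false =>
      have h1 : (if c + 1 > m then c + 1 else m) = max m (c + 1) := by
        rcases le_or_gt (c + 1) m with h | h
        · simp [not_lt.mpr h, max_eq_left h]
        · simp [h, max_eq_right (le_of_lt h)]
      have h2 : 0 ≤ max m (c + 1) := le_trans hm (le_max_left _ _)
      calc (List.foldl _ ((if c + 1 > m then c + 1 else m), c + 1) t).1
          = max (max m (c + 1)) (fRun (c + 1) t) := by rw [h1]; exact ih _ _ h2
        _ = max m (fRun c (false :: t)) := by rw [max_assoc]; rfl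

-- proof-side model of B: the active positions of l when enumeration starts at s
def tIdx (s : Int) (l : List Bool) : List Int :=
  ((PySem.List.enumerate l s).filter (·.2)).map (·.1)

-- proof-side model of B's max gap: previous bound p, remaining positions, final bound n
def gmax (p : Int) (idxs : List Int) (n : Int) : Int :=
  match idxs with
  | [] => n - p - 1
  | i :: t => max (i - p - 1) (gmax i t n)

lemma tIdx_cons (s : Int) (x : Bool) (t : List Bool) :
    tIdx s (x :: t) = (if x then [s] else []) ++ tIdx (s + 1) t := by
  cases x <;> simp [tIdx, PySem.List.enumerate_cons]

-- B's gaps list, recursively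
def gapsL (p : Int) (idxs : List Int) (n : Int) : List Int :=
  (((p :: idxs) ++ [n]).zip ((p :: idxs) ++ [n]).tail).map (fun q => q.2 - q.1 - 1)

lemma gapsL_nil (p n : Int) : gapsL p [] n = [n - p - 1] := rfl

lemma gapsL_cons (p i n : Int) (t : List Int) :
    gapsL p (i :: t) n = (i - p - 1) :: gapsL i t n := by
  simp [gapsL]

-- foldl max pulls the accumulator out
lemma foldl_max_cons (a g : Int) (gs : List Int) :
    List.foldl max a (g :: gs) = max a (List.foldl max g gs) := by
  show List.foldl max (max a g) gs = _
  induction gs generalizing g with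
  | nil => rfl
  | cons c gs ihg => simp only [List.foldl]; rw [max_assoc]; exact ihg _

-- Python's max over the (always nonempty) gaps list equals gmax
lemma maxD_gapsL (idxs : List Int) : ∀ p n : Int,
    (PySem.List.max? (gapsL p idxs n) (fun y => y)).getD 0 = gmax p idxs n := by
  induction idxs with
  | nil => intro p n; rw [gapsL_nil, PySem.List.max?_id_cons]; rfl
  | cons i t ih =>
    intro p n
    rw [gapsL_cons, gmax]
    cases hg : gapsL i t n with
    | nil => cases t <;> simp [gapsL_nil, gapsL_cons] at hg
    | cons g gs =>
      rw [PySem.List.max?_id_cons]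
      have h1 : List.foldl max (i - p - 1) (g :: gs)
          = max (i - p - 1) (List.foldl max g gs) := foldl_max_cons _ _ _
      have h2 : (PySem.List.max? (gapsL i t n) (fun y => y)).getD 0 = gmax i t n := ih i n
      rw [hg, PySem.List.max?_id_cons] at h2
      simp only [Option.getD_some] at h2 ⊢
      rw [h1, h2]

-- main bridge: A's pending-run recursion equals B's gap maximum
lemma fRun_eq_gmax (l : List Bool) : ∀ (s c : Int), 0 ≤ c →
    max c (fRun c l) = gmax (s - 1 - c) (tIdx s l) (s + l.length) := by
  induction l with
  | nil =>
    intro s c hc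
    simp [fRun, tIdx, PySem.List.enumerate, gmax, max_eq_left hc]
    ring
  | cons x t ih =>
    intro s c hc
    cases x with
    | true =>
      rw [tIdx_cons]
      show max c (fRun 0 t) = gmax (s - 1 - c) (s :: tIdx (s + 1) t) (s + (t.length + 1))
      have h0 := ih (s + 1) 0 le_rfl
      rw [max_eq_right (fRun_nonneg t 0 le_rfl)] at h0
      have hp : (s + 1 : Int) - 1 - 0 = s := by ring
      rw [hp] at h0
      have hb : s - (s - 1 - c) - 1 = c := by ring
      have hn : (s : Int) + ((t.length : Int) + 1) = (s + 1) + t.length := by ring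
      rw [gmax, hb, hn, h0]
    | false =>
      rw [tIdx_cons]
      show max c (max (c + 1) (fRun (c + 1) t))
          = gmax (s - 1 - c) (tIdx (s + 1) t) (s + (t.length + 1))
      have h0 := ih (s + 1) (c + 1) (by omega)
      have hn : (s : Int) + ((t.length : Int) + 1) = (s + 1) + t.length := by ring
      have hp : s - 1 - c = (s + 1) - 1 - (c + 1) := by ring
      rw [hn, hp, ← h0, max_eq_right]
      exact le_max_of_le_left (by omega)

-- ===== VERDICT (by name: the statement is the Claim_ definition above) =====
theorem analyze_concurrency_spec : Claim_equal_analyze_concurrency := by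
  intro L flags _
  show analyze_concurrency L flags = analyze_concurrency_alt L flags
  unfold analyze_concurrency analyze_concurrency_alt
  refine Prod.ext ?_ ?_
  · show (flags.foldl _ ((0:Int), (0:Int))).1
        = (PySem.List.max? ((((-1) :: ((PySem.List.enumerate flags).filter (·.2)).map (·.1) ++ [(flags.length : Int)]).zip
            (((-1) :: ((PySem.List.enumerate flags).filter (·.2)).map (·.1) ++ [(flags.length : Int)]).tail)).map
            (fun p => p.2 - p.1 - 1)) (fun y => y)).getD 0
    have hB : (((-1 : Int) :: ((PySem.List.enumerate flags).filter (·.2)).map (·.1) ++ [(flags.length : Int)]).zip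
            (((-1 : Int) :: ((PySem.List.enumerate flags).filter (·.2)).map (·.1) ++ [(flags.length : Int)]).tail)).map
            (fun p => p.2 - p.1 - 1) = gapsL (-1) (tIdx 0 flags) (flags.length : Int) := by
      simp [gapsL, tIdx]
    rw [loopA_eq flags 0 0 le_rfl, hB, maxD_gapsL]
    have := fRun_eq_gmax flags 0 0 le_rfl
    simpa using this
  · show (if (flags.length : Int) ≥ 2 * L then _ else false) = _
    by_cases h : (flags.length : Int) ≥ 2 * L
    · simp [h]
    · simp [h]
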